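-- pv_equiv track=rewrite | github.com/aberlins/DndCharacterApp | dndCharacterApp/dndEntities/character_sheet.py | _set_bool_prof_list
-- ===== SOURCE A (Python) =====
-- def _set_bool_prof_list(prof_default_names: (), prof_list: ()) -> ():
--     final_list = [False for i in range(len(prof_default_names))]
--
--     for i in range(len(prof_default_names)):
--         for prof in prof_list:
--             if prof.lower() == prof_default_names[i].lower():
--                 final_list[i] = True
--                 break
--
--     return final_list
-- ===== SOURCE B (Python) =====
-- def _set_bool_prof_list(prof_default_names: (), prof_list: ()) -> ():
--     index = {}
--     for i, name in enumerate(prof_default_names):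
--         index.setdefault(name.lower(), []).append(i)
--     final_list = [False] * len(prof_default_names)
--     for prof in prof_list:
--         for i in index.get(prof.lower(), []):
--             final_list[i] = True
--     return final_list
-- ===== Notes on version B (the rewrite author's own statement) =====
-- stated objective: faster
-- what changed: Inverts the control flow: instead of scanning prof_list once per default name, B prebuilds a dict from each lowercased default name to all its indices and then makes a single pass over prof_list, setting final_list[i]=True for every index of a matching key.
import Mathlib
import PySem

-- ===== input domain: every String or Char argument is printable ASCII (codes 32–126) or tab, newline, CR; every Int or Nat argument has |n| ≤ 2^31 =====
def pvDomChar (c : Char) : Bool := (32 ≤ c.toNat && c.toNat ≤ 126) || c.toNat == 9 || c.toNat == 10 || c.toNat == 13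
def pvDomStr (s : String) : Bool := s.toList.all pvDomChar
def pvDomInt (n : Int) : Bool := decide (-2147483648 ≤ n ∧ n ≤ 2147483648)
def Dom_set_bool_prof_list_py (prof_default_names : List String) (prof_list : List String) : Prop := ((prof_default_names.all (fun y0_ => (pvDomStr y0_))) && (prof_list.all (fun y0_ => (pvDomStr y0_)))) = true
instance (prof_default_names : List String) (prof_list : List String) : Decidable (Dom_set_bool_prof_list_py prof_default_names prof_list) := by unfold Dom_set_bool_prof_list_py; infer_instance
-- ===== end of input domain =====

-- B inverts the control flow (faster): a dict from each lowercased default name to all its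
-- indices is built once, then one pass over prof_list marks every index of a matching key.

-- ===== PORT A =====
-- inner 'for prof in prof_list: if prof.lower() == name_l: final_list[i] = True; break'
def pvInnerA (name_l : String) (acc : List Bool) (i : Nat) (profs : List String) : List Bool :=
  match profs with
  | [] => acc
  | p :: rest =>
    if PySem.Str.lower p == name_l then acc.set i true
    else pvInnerA name_l acc i rest

def set_bool_prof_list_py (prof_default_names : List String) (prof_list : List String) : List Bool :=
  (List.range prof_default_names.length).foldl
    (fun acc i => pvInnerA (PySem.Str.lower (prof_default_names.getD i "")) acc i prof_list)
    (List.replicate prof_default_names.length false)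

-- ===== PORT B =====
-- 'index.setdefault(name.lower(), []).append(i)' = modify key (getD key [] ++ [i]);
-- enumerate indices are ≥ 0, so '.toNat' on them is exact
def pvBuildIdx (names : List String) : PySem.Dict String (List Nat) :=
  (PySem.List.enumerate names).foldl
    (fun d p => d.modify (PySem.Str.lower p.2) [] (fun l => l ++ [p.1.toNat]))
    PySem.Dict.empty

def set_bool_prof_list_py_alt (prof_default_names : List String) (prof_list : List String) : List Bool :=
  let index := pvBuildIdx prof_default_names
  prof_list.foldl
    (fun acc prof =>
      (index.getD (PySem.Str.lower prof) []).foldl (fun a i => a.set i true) acc)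
    (List.replicate prof_default_names.length false)

-- ===== PRECONDITION & SPEC =====
def Spec_set_bool_prof_list_py (prof_default_names : List String) (prof_list : List String) (out : List Bool) : Prop := out = set_bool_prof_list_py_alt prof_default_names prof_list
instance (prof_default_names : List String) (prof_list : List String) (out : List Bool) : Decidable (Spec_set_bool_prof_list_py prof_default_names prof_list out) := by unfold Spec_set_bool_prof_list_py; infer_instance

-- ===== CLAIM (what is proved, stated in full; the proofs are below) =====
def Claim_equal_set_bool_prof_list_py : Prop := ∀ (prof_default_names : List String) (prof_list : List String), Dom_set_bool_prof_list_py prof_default_names prof_list → Spec_set_bool_prof_list_py prof_default_names prof_list (set_bool_prof_list_py prof_default_names prof_list)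

-- ===== LEMMAS AND PROOFS =====

-- pvInnerA = "set index i if some prof matches"
theorem pvInnerA_eq (name_l : String) (acc : List Bool) (i : Nat) (profs : List String) :
    pvInnerA name_l acc i profs =
      if profs.any (fun p => PySem.Str.lower p == name_l) then acc.set i true else acc := by
  induction profs with
  | nil => simp [pvInnerA]
  | cons p rest ih =>
    by_cases h : PySem.Str.lower p == name_l
    · simp [pvInnerA, h]
    · simp [pvInnerA, h, ih]

-- A's index-loop that conditionally sets positions to true, characterised pointwise
theorem foldl_set_getElem? (c : Nat → Bool) (l : List Nat) (acc : List Bool) (j : Nat) :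
    (l.foldl (fun a i => if c i then a.set i true else a) acc)[j]? =
      if j ∈ l ∧ c j = true then acc[j]?.map (fun _ => true) else acc[j]? := by
  induction l generalizing acc with
  | nil => simp
  | cons i rest ih =>
    simp only [List.foldl_cons, ih, List.mem_cons]
    by_cases hc : c i
    · by_cases hji : j = i
      · subst hji
        simp [hc, List.getElem?_set]
        by_cases hlt : j < acc.length
        · simp [hlt]
        · have hn : acc[j]? = none := List.getElem?_eq_none (Nat.le_of_not_lt hlt)
          simp [hn]
          omega
      · simp [hc, hji, Ne.symm hji]
    · by_cases hji : j = i
      · subst hji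
        simp [hc]
      · simp [hc, hji]

-- membership invariant of the index-building fold, generalized over start offset and dict
theorem pvBuildIdx_aux_mem (names : List String) (s : Nat) (d : PySem.Dict String (List Nat))
    (k : String) (i : Nat) :
    i ∈ ((PySem.List.enumerate names (s : Int)).foldl
          (fun d p => d.modify (PySem.Str.lower p.2) [] (fun l => l ++ [p.1.toNat])) d).getD k [] ↔
      i ∈ d.getD k [] ∨ (∃ x, s ≤ i ∧ names[i - s]? = some x ∧ PySem.Str.lower x = k) := by
  induction names generalizing s d with
  | nil => simp [PySem.List.enumerate_nil]
  | cons x xs ih =>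
    rw [PySem.List.enumerate_cons]
    have hcast : (s : Int) + 1 = ((s + 1 : Nat) : Int) := by push_cast; ring
    simp only [List.foldl_cons, hcast, ih]
    rw [PySem.Dict.getD_modify]
    constructor
    · rintro (h | ⟨y, hy1, hy2, hy3⟩)
      · by_cases hk : k = PySem.Str.lower x
        · subst hk
          rw [if_pos rfl] at h
          rcases List.mem_append.mp h with h' | h'
          · exact Or.inl h'
          · simp only [List.mem_singleton] at h'
            have hi : i = s := by simpa using h'
            subst hi
            exact Or.inr ⟨x, le_refl _, by simp, rfl⟩
        · rw [if_neg hk] at h; exact Or.inl h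
      · refine Or.inr ⟨y, by omega, ?_, hy3⟩
        have h2 : i - s = (i - (s + 1)) + 1 := by omega
        rw [h2]
        simpa using hy2
    · rintro (h | ⟨y, hy1, hy2, hy3⟩)
      · left
        by_cases hk : k = PySem.Str.lower x
        · rw [if_pos hk]; exact List.mem_append.mpr (Or.inl (hk ▸ h))
        · rw [if_neg hk]; exact h
      · by_cases hsi : i = s
        · subst hsi
          simp only [Nat.sub_self, List.getElem?_cons_zero, Option.some.injEq] at hy2
          subst hy2
          subst hy3
          left
          rw [if_pos rfl]
          exact List.mem_append.mpr (Or.inr (by simp))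
        · right
          refine ⟨y, by omega, ?_, hy3⟩
          have h2 : i - s = (i - (s + 1)) + 1 := by omega
          rw [h2] at hy2
          simpa using hy2
theorem pvBuildIdx_mem (names : List String) (k : String) (i : Nat) :
    i ∈ (pvBuildIdx names).getD k [] ↔
      (∃ x, names[i]? = some x ∧ PySem.Str.lower x = k) := by
  have h := pvBuildIdx_aux_mem names 0 PySem.Dict.empty k i
  simpa [pvBuildIdx, PySem.List.enumerate, PySem.Dict.getD_empty] using h

-- B's inner marking loop, pointwise
theorem pvSetAll_getElem? (l : List Nat) (acc : List Bool) (j : Nat) :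
    (l.foldl (fun a i => a.set i true) acc)[j]? =
      if j ∈ l then acc[j]?.map (fun _ => true) else acc[j]? := by
  induction l generalizing acc with
  | nil => simp
  | cons i rest ih =>
    simp only [List.foldl_cons, ih, List.mem_cons]
    by_cases hji : j = i
    · subst hji
      simp [List.getElem?_set]
      by_cases hlt : j < acc.length
      · simp [hlt]
      · have hn : acc[j]? = none := List.getElem?_eq_none (Nat.le_of_not_lt hlt)
        simp [hn]
        omega
    · simp [hji, List.getElem?_set_ne (Ne.symm hji)]

-- B's outer pass over prof_list, pointwise
theorem pvProfsFold_getElem? (profs : List String) (idx : PySem.Dict String (List Nat))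
    (acc : List Bool) (j : Nat) :
    (profs.foldl
        (fun acc prof => ((idx.getD (PySem.Str.lower prof) []).foldl (fun a i => a.set i true) acc))
        acc)[j]? =
      if ∃ p ∈ profs, j ∈ idx.getD (PySem.Str.lower p) []
      then acc[j]?.map (fun _ => true) else acc[j]? := by
  induction profs generalizing acc with
  | nil => simp
  | cons p rest ih =>
    simp only [List.foldl_cons, ih, pvSetAll_getElem?]
    by_cases hp : j ∈ idx.getD (PySem.Str.lower p) []
    · have hex : ∃ q ∈ p :: rest, j ∈ idx.getD (PySem.Str.lower q) [] :=
        ⟨p, List.mem_cons_self, hp⟩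
      rw [if_pos hp, if_pos hex]
      by_cases hr : ∃ q ∈ rest, j ∈ idx.getD (PySem.Str.lower q) []
      · rw [if_pos hr]
        cases acc[j]? <;> simp
      · rw [if_neg hr]
    · rw [if_neg hp]
      by_cases hr : ∃ q ∈ rest, j ∈ idx.getD (PySem.Str.lower q) []
      · have hex : ∃ q ∈ p :: rest, j ∈ idx.getD (PySem.Str.lower q) [] := by
          obtain ⟨q, hq, hj⟩ := hr
          exact ⟨q, List.mem_cons_of_mem p hq, hj⟩
        rw [if_pos hr, if_pos hex]
      · have hno : ¬ ∃ q ∈ p :: rest, j ∈ idx.getD (PySem.Str.lower q) [] := by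
          rintro ⟨q, hq, hj⟩
          rcases List.mem_cons.mp hq with rfl | hq'
          · exact hp hj
          · exact hr ⟨q, hq', hj⟩
        rw [if_neg hr, if_neg hno]

-- ===== VERDICT (by name: the statement is the Claim_ definition above) =====
theorem set_bool_prof_list_py_spec : Claim_equal_set_bool_prof_list_py := by
  intro names profs _
  unfold Spec_set_bool_prof_list_py set_bool_prof_list_py set_bool_prof_list_py_alt
  apply List.ext_getElem?
  intro j
  rw [show (fun acc i => pvInnerA (PySem.Str.lower (names.getD i "")) acc i profs) =
      (fun (a : List Bool) i =>
        if profs.any (fun p => PySem.Str.lower p == PySem.Str.lower (names.getD i "")) then a.set i true else a)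
    from by funext a i; exact pvInnerA_eq _ a i profs]
  rw [foldl_set_getElem? (fun i => profs.any (fun p => PySem.Str.lower p == PySem.Str.lower (names.getD i "")))]
  rw [pvProfsFold_getElem? profs (pvBuildIdx names)]
  by_cases hj : j < names.length
  · have hnames : names[j]? = some names[j] := List.getElem?_eq_getElem hj
    have hgd : names.getD j "" = names[j] := by simp [List.getD, hnames]
    have hcond : (j ∈ List.range names.length ∧
        profs.any (fun p => PySem.Str.lower p == PySem.Str.lower (names.getD j "")) = true) ↔
        (∃ p ∈ profs, j ∈ (pvBuildIdx names).getD (PySem.Str.lower p) []) := by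
      simp only [List.mem_range, hj, true_and, hgd, List.any_eq_true, beq_iff_eq]
      constructor
      · rintro ⟨p, hp, he⟩
        exact ⟨p, hp, (pvBuildIdx_mem names _ j).mpr ⟨names[j], hnames, he.symm⟩⟩
      · rintro ⟨p, hp, hm⟩
        obtain ⟨x, hx1, hx2⟩ := (pvBuildIdx_mem names _ j).mp hm
        rw [hnames] at hx1
        cases hx1
        exact ⟨p, hp, hx2.symm⟩
    by_cases hA : j ∈ List.range names.length ∧
        profs.any (fun p => PySem.Str.lower p == PySem.Str.lower (names.getD j "")) = true
    · rw [if_pos hA, if_pos (hcond.mp hA)]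
    · rw [if_neg hA, if_neg (fun h => hA (hcond.mpr h))]
  · have h1 : (List.replicate names.length false)[j]? = none :=
      List.getElem?_eq_none (by simp; omega)
    simp only [h1, Option.map_none]
    split <;> split <;> rfl
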